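-- pv_equiv track=rewrite | github.com/GaspardVCS/AdventOfCode2020 | day17.py | compute_minmax2
-- ===== SOURCE A (Python) =====
-- def compute_minmax2(grid):
--     x, y, z, w = [], [], [], []
--     for k in grid:
--         x.append(k[0])
--         y.append(k[1])
--         z.append(k[2])
--         w.append(k[3])
--     max_x, max_y, max_z, max_w = max(x) + 2, max(y) + 2, max(z) + 2, max(w) + 2
--     min_x, min_y, min_z, min_w = min(x) - 1, min(y) - 1, min(z) - 1, min(w) - 1
--
--     return [min_x, max_x, min_y, max_y, min_z, max_z, min_w, max_w]
-- ===== SOURCE B (Python) =====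
-- def compute_minmax2(grid):
--     it = iter(grid)
--     try:
--         k = next(it)
--     except StopIteration:
--         raise ValueError("compute_minmax2: empty grid")
--     min_x = max_x = k[0]
--     min_y = max_y = k[1]
--     min_z = max_z = k[2]
--     min_w = max_w = k[3]
--     for k in it:
--         if k[0] < min_x: min_x = k[0]
--         if k[0] > max_x: max_x = k[0]
--         if k[1] < min_y: min_y = k[1]
--         if k[1] > max_y: max_y = k[1]
--         if k[2] < min_z: min_z = k[2]
--         if k[2] > max_z: max_z = k[2]
--         if k[3] < min_w: min_w = k[3]
--         if k[3] > max_w: max_w = k[3]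
--     return [min_x - 1, max_x + 2, min_y - 1, max_y + 2,
--             min_z - 1, max_z + 2, min_w - 1, max_w + 2]
-- ===== Notes on version B (the rewrite author's own statement) =====
-- stated objective: simpler
-- what changed: One pass maintaining running (min,max) pairs per dimension instead of building four coordinate lists and scanning each twice with max()/min().
import Mathlib
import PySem

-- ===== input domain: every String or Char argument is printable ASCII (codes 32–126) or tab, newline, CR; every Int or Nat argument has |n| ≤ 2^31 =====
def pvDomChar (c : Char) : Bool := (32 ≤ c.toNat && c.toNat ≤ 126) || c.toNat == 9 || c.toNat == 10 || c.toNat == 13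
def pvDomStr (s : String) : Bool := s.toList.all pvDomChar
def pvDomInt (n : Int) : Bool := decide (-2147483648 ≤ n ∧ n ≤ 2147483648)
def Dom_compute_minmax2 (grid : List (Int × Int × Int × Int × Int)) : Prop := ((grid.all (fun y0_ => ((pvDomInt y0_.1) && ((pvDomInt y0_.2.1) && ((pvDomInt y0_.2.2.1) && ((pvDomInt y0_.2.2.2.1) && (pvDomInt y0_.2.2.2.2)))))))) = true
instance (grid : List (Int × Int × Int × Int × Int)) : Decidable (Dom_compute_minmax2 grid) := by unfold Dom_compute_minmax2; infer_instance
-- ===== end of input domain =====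

-- B replaces A's four appended coordinate lists + max()/min() scans by one pass keeping
-- running (min,max) pairs for each of the four used dimensions (objective: simpler).

-- ===== PORT A =====
-- A: build four lists x,y,z,w by appending, then take max(..)+2 and min(..)-1 of each.
def compute_minmax2 (grid : List (Int × Int × Int × Int × Int)) : List Int :=
  let st := grid.foldl
    (fun (acc : List Int × List Int × List Int × List Int) k =>
      (acc.1 ++ [k.1], acc.2.1 ++ [k.2.1], acc.2.2.1 ++ [k.2.2.1], acc.2.2.2 ++ [k.2.2.2.1]))
    ([], [], [], [])
  match PySem.List.max? st.1 (fun v => v), PySem.List.max? st.2.1 (fun v => v),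
        PySem.List.max? st.2.2.1 (fun v => v), PySem.List.max? st.2.2.2 (fun v => v),
        PySem.List.min? st.1 (fun v => v), PySem.List.min? st.2.1 (fun v => v),
        PySem.List.min? st.2.2.1 (fun v => v), PySem.List.min? st.2.2.2 (fun v => v) with
  | some mx, some my, some mz, some mw, some nx, some ny, some nz, some nw =>
      [nx - 1, mx + 2, ny - 1, my + 2, nz - 1, mz + 2, nw - 1, mw + 2]
  | _, _, _, _, _, _, _, _ => []   -- Python raises ValueError here (empty grid); excluded by Pre_

-- ===== PORT B =====
-- B's loop: one pass over the tail, updating eight running bounds with comparisons.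
def pvBLoop : List (Int × Int × Int × Int × Int) →
    Int → Int → Int → Int → Int → Int → Int → Int → List Int
  | [], mnx, mxx, mny, mxy, mnz, mxz, mnw, mxw =>
      [mnx - 1, mxx + 2, mny - 1, mxy + 2, mnz - 1, mxz + 2, mnw - 1, mxw + 2]
  | k :: rest, mnx, mxx, mny, mxy, mnz, mxz, mnw, mxw =>
      pvBLoop rest
        (if k.1 < mnx then k.1 else mnx) (if k.1 > mxx then k.1 else mxx)
        (if k.2.1 < mny then k.2.1 else mny) (if k.2.1 > mxy then k.2.1 else mxy)
        (if k.2.2.1 < mnz then k.2.2.1 else mnz) (if k.2.2.1 > mxz then k.2.2.1 else mxz)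
        (if k.2.2.2.1 < mnw then k.2.2.2.1 else mnw) (if k.2.2.2.1 > mxw then k.2.2.2.1 else mxw)

def compute_minmax2_alt (grid : List (Int × Int × Int × Int × Int)) : List Int :=
  match grid with
  | [] => []   -- Python raises ValueError here; excluded by Pre_
  | k :: rest =>
      pvBLoop rest k.1 k.1 k.2.1 k.2.1 k.2.2.1 k.2.2.1 k.2.2.2.1 k.2.2.2.1

-- ===== PRECONDITION & SPEC =====
-- Pre_ excludes only the empty grid, on which both Pythons raise ValueError (max/min of []).
def Pre_compute_minmax2 (grid : List (Int × Int × Int × Int × Int)) : Prop := grid ≠ []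
instance (grid : List (Int × Int × Int × Int × Int)) : Decidable (Pre_compute_minmax2 grid) := by
  unfold Pre_compute_minmax2; infer_instance

def pvWitness_compute_minmax2 : (List (Int × Int × Int × Int × Int)) := [(0, 1, -2, 3, 4)]

def Spec_compute_minmax2 (grid : List (Int × Int × Int × Int × Int)) (out : List Int) : Prop :=
  out = compute_minmax2_alt grid
instance (grid : List (Int × Int × Int × Int × Int)) (out : List Int) :
    Decidable (Spec_compute_minmax2 grid out) := by unfold Spec_compute_minmax2; infer_instance

-- ===== CLAIM (what is proved, stated in full; the proofs are below) =====
def Claim_equal_compute_minmax2 : Prop :=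
  ∀ (grid : List (Int × Int × Int × Int × Int)), Dom_compute_minmax2 grid →
    Pre_compute_minmax2 grid → Spec_compute_minmax2 grid (compute_minmax2 grid)

-- ===== LEMMAS AND PROOFS =====

-- A's accumulating loop builds the four coordinate maps.
theorem pvA_fold (grid : List (Int × Int × Int × Int × Int))
    (a b c d : List Int) :
    grid.foldl
      (fun (acc : List Int × List Int × List Int × List Int) k =>
        (acc.1 ++ [k.1], acc.2.1 ++ [k.2.1], acc.2.2.1 ++ [k.2.2.1], acc.2.2.2 ++ [k.2.2.2.1]))
      (a, b, c, d)
    = (a ++ grid.map (·.1), b ++ grid.map (·.2.1),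
       c ++ grid.map (·.2.2.1), d ++ grid.map (·.2.2.2.1)) := by
  induction grid generalizing a b c d with
  | nil => simp
  | cons k rest ih => simp [List.foldl, ih]

-- B's loop computes the running minima/maxima of the four coordinate maps.
theorem pvBLoop_eq (rest : List (Int × Int × Int × Int × Int))
    (mnx mxx mny mxy mnz mxz mnw mxw : Int) :
    pvBLoop rest mnx mxx mny mxy mnz mxz mnw mxw
    = [(rest.map (·.1)).foldl min mnx - 1, (rest.map (·.1)).foldl max mxx + 2,
       (rest.map (·.2.1)).foldl min mny - 1, (rest.map (·.2.1)).foldl max mxy + 2,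
       (rest.map (·.2.2.1)).foldl min mnz - 1, (rest.map (·.2.2.1)).foldl max mxz + 2,
       (rest.map (·.2.2.2.1)).foldl min mnw - 1, (rest.map (·.2.2.2.1)).foldl max mxw + 2] := by
  induction rest generalizing mnx mxx mny mxy mnz mxz mnw mxw with
  | nil => simp [pvBLoop]
  | cons k rest ih =>
      have hmin : ∀ a b : Int, (if a < b then a else b) = min b a := by
        intro a b; rw [Int.min_def]; split_ifs <;> omega
      have hmax : ∀ a b : Int, (if a > b then a else b) = max b a := by
        intro a b; rw [Int.max_def]; split_ifs <;> omega
      simp only [pvBLoop, ih, List.map, List.foldl, hmin, hmax]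

-- ===== VERDICT (by name: the statement is the Claim_ definition above) =====
theorem compute_minmax2_spec : Claim_equal_compute_minmax2 := by
  intro grid _ hpre
  unfold Spec_compute_minmax2
  match grid with
  | [] => exact absurd rfl hpre
  | k :: rest =>
      simp only [compute_minmax2, compute_minmax2_alt, pvA_fold, List.nil_append,
        List.map_cons, PySem.List.max?_id_cons, PySem.List.min?_id_cons, pvBLoop_eq]
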